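-- pv_equiv track=rewrite | github.com/wd-hub/km_training | utils/testing_pairs_generator.py | create_indices
-- ===== SOURCE A (Python) =====
-- def create_indices(labels):
--     old = labels[0]
--     indices = dict()
--     indices[old] = 0
--     for x in range(len(labels) - 1):
--         new = labels[x+1]
--         if old != new:
--             indices[new] = x+1
--         old = new
--     return indices
-- ===== SOURCE B (Python) =====
-- def create_indices(labels):
--     indices = {labels[0]: 0}
--     # run-length encode the label sequence
--     runs = []
--     cur, cnt = labels[0], 0
--     for x in labels:
--         if x == cur:
--             cnt += 1
--         else:
--             runs.append((cur, cnt))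
--             cur, cnt = x, 1
--     runs.append((cur, cnt))
--     # each run's key maps to the run's start index
--     i = 0
--     for k, m in runs:
--         indices[k] = i
--         i += m
--     return indices
-- ===== Notes on version B (the rewrite author's own statement) =====
-- stated objective: alternative
-- what changed: B run-length encodes the label sequence and then assigns each run's start index from accumulated run lengths, instead of A's single pass comparing adjacent elements and recording transition boundaries.
import Mathlib
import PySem

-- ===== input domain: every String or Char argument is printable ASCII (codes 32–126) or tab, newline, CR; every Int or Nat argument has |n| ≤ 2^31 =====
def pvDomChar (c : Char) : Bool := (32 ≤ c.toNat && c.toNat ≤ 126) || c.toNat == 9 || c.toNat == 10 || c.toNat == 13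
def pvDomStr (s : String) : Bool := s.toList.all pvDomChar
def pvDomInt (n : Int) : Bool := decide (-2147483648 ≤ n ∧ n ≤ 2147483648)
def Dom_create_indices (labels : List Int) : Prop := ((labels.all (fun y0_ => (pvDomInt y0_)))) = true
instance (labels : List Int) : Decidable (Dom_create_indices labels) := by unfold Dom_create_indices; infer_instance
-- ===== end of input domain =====

-- B re-implements create_indices via run-length encoding (runs, then start offsets) instead of
-- A's adjacent-element comparison; same cost, different structure (return-value equivalence).

-- ===== PORT A =====
-- A: old = labels[0]; dict {old: 0}; for x in range(len(labels)-1): new = labels[x+1];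
-- record each transition boundary.  labels = [] raises IndexError (excluded by Pre_).
def create_indices (labels : List Int) : List (Int × Int) :=
  match labels with
  | [] => []  -- labels[0] raises IndexError; excluded by Pre_create_indices
  | h :: _ =>
    ((PySem.List.pyRange 0 ((labels.length : Int) - 1) 1).foldl
      (fun (s : Int × PySem.Dict Int Int) x =>
        let new := PySem.List.pyGetD labels (x + 1) 0
        (new, if s.1 ≠ new then s.2.insert new (x + 1) else s.2))
      (h, (PySem.Dict.empty : PySem.Dict Int Int).insert h 0)).2.items

-- ===== PORT B =====
-- B: seed {labels[0]: 0}; run-length encode labels with a (runs, cur, cnt) accumulator;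
-- then walk the runs assigning each key its run's start index.
def create_indices_alt (labels : List Int) : List (Int × Int) :=
  match labels with
  | [] => []  -- labels[0] raises IndexError; excluded by Pre_create_indices
  | h :: _ =>
    let s := labels.foldl
      (fun (s : List (Int × Int) × Int × Int) x =>
        if x = s.2.1 then (s.1, s.2.1, s.2.2 + 1)
        else (s.1 ++ [(s.2.1, s.2.2)], x, 1)) ([], h, 0)
    let runs := s.1 ++ [(s.2.1, s.2.2)]
    ((runs.foldl
      (fun (t : PySem.Dict Int Int × Int) km => (t.1.insert km.1 t.2, t.2 + km.2))
      ((PySem.Dict.empty : PySem.Dict Int Int).insert h 0, 0)).1).items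

-- ===== PRECONDITION & SPEC =====
-- Pre_ excludes only the empty list, on which A raises IndexError (labels[0]); B raises there too.
def Pre_create_indices (labels : List Int) : Prop := labels ≠ []
instance (labels : List Int) : Decidable (Pre_create_indices labels) := by
  unfold Pre_create_indices; infer_instance
def pvWitness_create_indices : List Int := [1, 1, 2, 2, 1]
def Spec_create_indices (labels : List Int) (out : List (Int × Int)) : Prop := out = create_indices_alt labels
instance (labels : List Int) (out : List (Int × Int)) : Decidable (Spec_create_indices labels out) := by unfold Spec_create_indices; infer_instance

-- ===== CLAIM (what is proved, stated in full; the proofs are below) =====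
def Claim_equal_create_indices : Prop := ∀ (labels : List Int), Dom_create_indices labels → Pre_create_indices labels → Spec_create_indices labels (create_indices labels)

-- ===== LEMMAS AND PROOFS =====

-- reference recursion: A's loop body as structural recursion on the suffix of labels
def pvGo (old : Int) (d : PySem.Dict Int Int) (i : Int) : List Int → PySem.Dict Int Int
  | [] => d
  | new :: rest => pvGo new (if old ≠ new then d.insert new i else d) (i + 1) rest

-- run-length encoding as structural recursion (reference form of B's first loop)
def pvGoRuns (cur cnt : Int) : List Int → List (Int × Int)
  | [] => [(cur, cnt)]
  | x :: xs => if x = cur then pvGoRuns cur (cnt + 1) xs else (cur, cnt) :: pvGoRuns x 1 xs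

lemma pv_ins_idem (h : Int) :
    ((PySem.Dict.empty : PySem.Dict Int Int).insert h 0).insert h 0
      = (PySem.Dict.empty : PySem.Dict Int Int).insert h 0 := by
  apply PySem.Dict.ext
  simp [PySem.Dict.items_insert, PySem.Dict.contains_insert_self, PySem.Dict.empty]

lemma pv_loopA (labels : List Int) :
    ∀ (u : List Int) (k : Nat), labels.drop (k + 1) = u →
      (k + 1) + u.length = labels.length → ∀ (old : Int) (d : PySem.Dict Int Int),
      ((PySem.List.pyRange (k : Int) ((labels.length : Int) - 1) 1).foldl
        (fun (s : Int × PySem.Dict Int Int) x =>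
          let new := PySem.List.pyGetD labels (x + 1) 0
          (new, if s.1 ≠ new then s.2.insert new (x + 1) else s.2)) (old, d)).2
      = pvGo old d ((k : Int) + 1) u := by
  intro u
  induction u with
  | nil =>
    intro k hdrop hlen old d
    rw [PySem.List.pyRange_one_eq_nil (by simp at hlen; omega)]
    simp [pvGo]
  | cons v u' ih =>
    intro k hdrop hlen old d
    have hk : (k : Int) < (labels.length : Int) - 1 := by
      simp at hlen; omega
    rw [PySem.List.pyRange_one_cons hk]
    have hget : PySem.List.pyGetD labels ((k : Int) + 1) 0 = v := by
      have h1 : ((k : Int) + 1) = ((k + 1 : Nat) : Int) := by push_cast; ring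
      have h2 : labels[k + 1]? = some v := by
        rw [← List.head?_drop, hdrop]; rfl
      rw [h1, PySem.List.pyGetD_natCast]
      simp [List.getD, h2]
    simp only [List.foldl_cons, hget]
    have hdrop' : labels.drop (k + 1 + 1) = u' := by
      have := congrArg (List.drop 1) hdrop
      simpa [List.drop_drop, Nat.add_comm] using this
    have hstep := ih (k + 1) hdrop' (by simp at hlen ⊢; omega) v
      (if old ≠ v then d.insert v ((k : Int) + 1) else d)
    push_cast at hstep
    rw [show ((k : Int) + 1 + 1) = ((k : Int) + 1) + 1 by ring] at hstep
    simpa [pvGo] using hstep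

lemma pv_rle_spec :
    ∀ (t : List Int) (acc : List (Int × Int)) (cur cnt : Int),
      ((t.foldl (fun (s : List (Int × Int) × Int × Int) x =>
          if x = s.2.1 then (s.1, s.2.1, s.2.2 + 1)
          else (s.1 ++ [(s.2.1, s.2.2)], x, 1)) (acc, cur, cnt)).1
       ++ [((t.foldl (fun (s : List (Int × Int) × Int × Int) x =>
          if x = s.2.1 then (s.1, s.2.1, s.2.2 + 1)
          else (s.1 ++ [(s.2.1, s.2.2)], x, 1)) (acc, cur, cnt)).2.1,
           (t.foldl (fun (s : List (Int × Int) × Int × Int) x =>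
          if x = s.2.1 then (s.1, s.2.1, s.2.2 + 1)
          else (s.1 ++ [(s.2.1, s.2.2)], x, 1)) (acc, cur, cnt)).2.2)])
      = acc ++ pvGoRuns cur cnt t := by
  intro t
  induction t with
  | nil => intro acc cur cnt; simp [pvGoRuns]
  | cons x xs ih =>
    intro acc cur cnt
    by_cases hx : x = cur
    · simp only [List.foldl_cons, hx, if_true]
      rw [ih acc cur (cnt + 1)]
      simp [pvGoRuns]
    · simp only [List.foldl_cons, if_neg hx]
      rw [ih (acc ++ [(cur, cnt)]) x 1]
      simp [pvGoRuns, hx]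

lemma pv_runs_fold :
    ∀ (t : List Int) (old cnt : Int) (d : PySem.Dict Int Int) (i : Int),
      ((pvGoRuns old cnt t).foldl
        (fun (s : PySem.Dict Int Int × Int) km => (s.1.insert km.1 s.2, s.2 + km.2)) (d, i)).1
      = pvGo old (d.insert old i) (i + cnt) t := by
  intro t
  induction t with
  | nil => intro old cnt d i; simp [pvGoRuns, pvGo]
  | cons x xs ih =>
    intro old cnt d i
    by_cases hx : x = old
    · subst hx
      simp only [pvGoRuns, if_true]
      rw [ih x (cnt + 1) d i, show i + (cnt + 1) = (i + cnt) + 1 by ring]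
      simp [pvGo]
    · simp only [pvGoRuns, if_neg hx, List.foldl_cons]
      rw [ih x 1 (d.insert old i) (i + cnt)]
      simp [pvGo, Ne.symm hx]

-- ===== VERDICT (by name: the statement is the Claim_ definition above) =====
theorem create_indices_spec : Claim_equal_create_indices := by
  intro labels _ hpre
  unfold Spec_create_indices
  match labels with
  | [] => exact absurd rfl hpre
  | h :: t =>
    have hA0 := pv_loopA (h :: t) t 0 (by simp)
      (by simp only [List.length_cons]; omega) h
      ((PySem.Dict.empty : PySem.Dict Int Int).insert h 0)
    simp only [Nat.cast_zero, zero_add] at hA0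
    have hB0 := pv_rle_spec (h :: t) [] h 0
    have hB1 := pv_runs_fold (h :: t) h 0
      ((PySem.Dict.empty : PySem.Dict Int Int).insert h 0) 0
    simp only [create_indices, create_indices_alt]
    rw [hA0]
    rw [List.nil_append] at hB0
    rw [hB0, hB1, pv_ins_idem]
    norm_num
    simp [pvGo]
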